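-- pv_equiv track=rewrite | github.com/Cirius1792/PyCharm | TDP/homework1/homework1_CiroLucioTecce.py | espandi
-- ===== SOURCE A (Python) =====
-- def espandi(L):
--     """starting from the list L, the function returns a new list containing all the elements of L, followed
--     by the sum of all the previous elements"""
--     tmp = []
--     for i in range(0, len(L)):
--         v = 0
--         tmp.append(L[i])
--         for j in range(0, i + 1):
--             v += L[j]
--         tmp.append(v)
--     return tmp
-- ===== SOURCE B (Python) =====
-- def espandi(L):
--     """starting from the list L, the function returns a new list containing all the elements of L, followed
--     by the sum of all the previous elements"""
--     out = []
--     s = 0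
--     for x in L:
--         s += x
--         out.append(x)
--         out.append(s)
--     return out
-- ===== Notes on version B (the rewrite author's own statement) =====
-- stated objective: faster
-- what changed: B keeps a running sum in a single pass over the list instead of recomputing each prefix sum with an inner index loop.
import Mathlib
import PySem

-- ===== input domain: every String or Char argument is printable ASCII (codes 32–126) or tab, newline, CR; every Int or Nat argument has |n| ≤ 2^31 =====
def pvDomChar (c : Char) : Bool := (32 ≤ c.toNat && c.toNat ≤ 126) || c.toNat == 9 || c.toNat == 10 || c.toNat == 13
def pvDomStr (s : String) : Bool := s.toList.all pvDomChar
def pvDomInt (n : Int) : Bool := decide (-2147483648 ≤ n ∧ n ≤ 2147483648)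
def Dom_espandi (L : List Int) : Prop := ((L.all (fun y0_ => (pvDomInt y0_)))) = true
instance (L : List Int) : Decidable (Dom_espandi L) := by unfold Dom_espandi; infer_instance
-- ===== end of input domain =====

-- B replaces A's quadratic inner prefix-sum loop by a single pass with a running sum (faster, asymptotic).

-- ===== PORT A =====
-- literal transliteration: outer loop over range(0, len(L)), inner loop recomputes the prefix sum
def espandi (L : List Int) : List Int :=
  (PySem.List.pyRange 0 (PySem.List.len L) 1).foldl
    (fun tmp i =>
      let tmp := tmp ++ [PySem.List.pyGetD L i 0]
      let v := (PySem.List.pyRange 0 (i + 1) 1).foldl (fun v j => v + PySem.List.pyGetD L j 0) 0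
      tmp ++ [v])
    []

-- ===== PORT B =====
-- literal transliteration of Source B: one fold carrying (out, running sum)
def espandi_alt (L : List Int) : List Int :=
  (L.foldl (fun (acc : List Int × Int) x =>
      let s := acc.2 + x
      (acc.1 ++ [x, s], s))
    ([], 0)).1

-- ===== PRECONDITION & SPEC =====
def Spec_espandi (L : List Int) (out : List Int) : Prop := out = espandi_alt L
instance (L : List Int) (out : List Int) : Decidable (Spec_espandi L out) := by unfold Spec_espandi; infer_instance

-- ===== CLAIM (what is proved, stated in full; the proofs are below) =====
def Claim_equal_espandi : Prop := ∀ (L : List Int), Dom_espandi L → Spec_espandi L (espandi L)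

-- ===== LEMMAS AND PROOFS =====

-- common reference shape: x₁, s+x₁, x₂, s+x₁+x₂, …
def pvG (s : Int) : List Int → List Int
  | [] => []
  | x :: xs => x :: (s + x) :: pvG (s + x) xs

theorem pvG_append (M : List Int) (x s : Int) :
    pvG s (M ++ [x]) = pvG s M ++ [x, s + M.sum + x] := by
  induction M generalizing s with
  | nil => simp [pvG]
  | cons a M ih => simp [pvG, ih]; ring_nf

-- B's fold accumulates pvG
theorem alt_fold (L : List Int) (acc : List Int) (s : Int) :
    (L.foldl (fun (acc : List Int × Int) x =>
        let t := acc.2 + x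
        (acc.1 ++ [x, t], t)) (acc, s)).1 = acc ++ pvG s L := by
  induction L generalizing acc s with
  | nil => simp [pvG]
  | cons x xs ih => simp [pvG, ih]

theorem espandi_alt_eq (L : List Int) : espandi_alt L = pvG 0 L := by
  simpa [espandi_alt] using alt_fold L [] 0

theorem pvSumTake (L : List Int) (m : Nat) (h : m < L.length) :
    (L.take (m + 1)).sum = (L.take m).sum + L[m] := by
  rw [List.take_add_one (i := m), List.getElem?_eq_getElem h, Option.toList_some,
    List.sum_append, List.sum_cons, List.sum_nil]
  ring

-- A's inner loop is the prefix sum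
theorem pvInnerSum (L : List Int) (k : Nat) (hk : k < L.length) :
    (PySem.List.pyRange 0 ((k : Int) + 1) 1).foldl (fun v j => v + PySem.List.pyGetD L j 0) 0
      = (L.take (k + 1)).sum := by
  induction k with
  | zero =>
    have h0 : (((0 : Nat) : Int) + 1) = (0 : Int) + 1 := by norm_num
    rw [h0, PySem.List.pyRange_one_singleton]
    rcases L with _ | ⟨a, M⟩
    · simp at hk
    · simp [PySem.List.pyGetD]
  | succ k ih =>
    have h1 : (((k + 1 : Nat) : Int) + 1) = ((k : Int) + 1) + 1 := by push_cast; ring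
    rw [h1, PySem.List.pyRange_one_succ_right (by positivity), List.foldl_append]
    rw [ih (by omega)]
    have h2 : ((k : Int) + 1) = ((k + 1 : Nat) : Int) := by push_cast; ring
    rw [List.foldl_cons, List.foldl_nil, h2, PySem.List.pyGetD_natCast L (k + 1) 0]
    have hlt : k + 1 < L.length := hk
    simp only [List.getD, List.getElem?_eq_getElem hlt, Option.getD_some]
    exact (pvSumTake L (k + 1) hlt).symm

-- A's result equals pvG 0 (L.take n) after n outer iterations
theorem a_fold (L : List Int) (n : Nat) (hn : n ≤ L.length) :
    (List.range n).flatMap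
        (fun k => [L.getD k 0,
          (PySem.List.pyRange 0 ((k : Int) + 1) 1).foldl (fun v j => v + PySem.List.pyGetD L j 0) 0])
      = pvG 0 (L.take n) := by
  induction n with
  | zero => simp [pvG]
  | succ n ih =>
    rw [List.range_succ, List.flatMap_append, ih (by omega)]
    have hlt : n < L.length := by omega
    simp only [List.flatMap_cons, List.flatMap_nil, List.append_nil]
    rw [pvInnerSum L n hlt]
    rw [List.take_add_one (i := n), List.getElem?_eq_getElem hlt]
    simp only [Option.toList_some, pvG_append]
    simp [List.getD, List.getElem?_eq_getElem hlt]
    rw [pvSumTake L n hlt]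

theorem espandi_eq (L : List Int) : espandi L = pvG 0 L := by
  unfold espandi
  simp only [List.append_assoc, List.singleton_append]
  rw [PySem.List.foldl_append_eq_flatMap
    (fun i => [PySem.List.pyGetD L i 0,
      (PySem.List.pyRange 0 (i + 1) 1).foldl (fun v j => v + PySem.List.pyGetD L j 0) 0])]
  rw [PySem.List.len_eq, PySem.List.pyRange_one]
  rw [List.flatMap_map]
  have : (fun k : Nat => [PySem.List.pyGetD L ((0 : Int) + k) 0,
      (PySem.List.pyRange 0 (((0 : Int) + k) + 1) 1).foldl (fun v j => v + PySem.List.pyGetD L j 0) 0])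
      = (fun k : Nat => [L.getD k 0,
      (PySem.List.pyRange 0 ((k : Int) + 1) 1).foldl (fun v j => v + PySem.List.pyGetD L j 0) 0]) := by
    funext k
    simp [PySem.List.pyGetD_natCast]
  rw [this]
  have := a_fold L L.length (le_refl _)
  simpa using this

-- ===== VERDICT (by name: the statement is the Claim_ definition above) =====
theorem espandi_spec : Claim_equal_espandi := by
  intro L _
  unfold Spec_espandi
  rw [espandi_eq, espandi_alt_eq]
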